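-- pv_equiv track=rewrite | github.com/jainaman224/Algo_Ds_Notes | Longest_Palindromic_Subsequence/Longest_Palindromic_Subsequence.py | print_lps
-- ===== SOURCE A (Python) =====
-- def print_lps(lps_dp, length, st, rev):
--     row = length
--     col = length
--     ans = ""
--     while (row > 0 and col > 0):
--         if (st[row-1] == rev[col-1]):
--             ans = st[row-1] + ans
--             row = row-1
--             col = col-1
--         else:
--             if (lps_dp[row - 1][col] > lps_dp[row][col - 1]):
--                 row = row-1
--             else:
--                 col = col-1
--     return ans
-- ===== SOURCE B (Python) =====
-- def print_lps(lps_dp, length, st, rev):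
--     runs = []            # (lo, hi): st[lo:hi] is a maximal diagonal run of matches
--     row = col = length
--     hi = None            # exclusive end (in st) of the run currently being traced
--     while row > 0 and col > 0:
--         if st[row-1] == rev[col-1]:
--             if hi is None:
--                 hi = row
--             row -= 1
--             col -= 1
--         else:
--             if hi is not None:
--                 runs.append((row, hi))
--                 hi = None
--             if lps_dp[row-1][col] > lps_dp[row][col-1]:
--                 row -= 1
--             else:
--                 col -= 1
--     if hi is not None:
--         runs.append((row, hi))
--     return ''.join(st[lo:hi] for lo, hi in reversed(runs))
-- ===== Notes on version B (the rewrite author's own statement) =====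
-- stated objective: faster
-- what changed: A accumulates the answer character by character, prepending each matched character onto a string; B maintains maximal diagonal runs as (lo, hi) index pairs, closing a run on each mismatch, and renders the answer once at the end as a join of string slices st[lo:hi] over the reversed run list.
-- outside the precondition, e.g. on print_lps([[0, 9], [0, 0]], 2, 'ab', 'cb'): A returns 'b', B returns 'b'
import Mathlib
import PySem

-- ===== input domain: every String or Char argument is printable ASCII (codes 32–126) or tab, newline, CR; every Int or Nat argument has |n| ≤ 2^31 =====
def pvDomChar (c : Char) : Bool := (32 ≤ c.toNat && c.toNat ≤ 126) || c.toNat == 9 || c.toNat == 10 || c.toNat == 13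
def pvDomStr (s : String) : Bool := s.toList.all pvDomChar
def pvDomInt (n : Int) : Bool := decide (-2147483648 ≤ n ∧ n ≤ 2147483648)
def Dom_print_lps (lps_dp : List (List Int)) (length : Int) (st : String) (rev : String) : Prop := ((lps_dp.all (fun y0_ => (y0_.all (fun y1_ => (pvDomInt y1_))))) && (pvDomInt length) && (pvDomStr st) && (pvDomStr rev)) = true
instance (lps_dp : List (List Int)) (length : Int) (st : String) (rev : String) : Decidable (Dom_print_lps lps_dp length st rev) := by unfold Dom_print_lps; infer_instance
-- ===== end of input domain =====

-- B traces the same table walk but maintains maximal diagonal RUNS (lo,hi) instead of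
-- characters, and renders the answer as a join of string slices st[lo:hi] (objective: faster —
-- runs + one slice-join replace A's quadratic per-character string prepending; measured).


-- ===== PORT A =====
-- lps_dp[r][c] (in-range under Pre_; default 0 outside, where nothing is claimed)
def pvDp (lps_dp : List (List Int)) (r c : Int) : Int :=
  (PySem.List.pyGet? ((PySem.List.pyGet? lps_dp r).getD []) c).getD 0

-- st[i] (in-range under Pre_; default ' ' outside, where nothing is claimed)
def pvCh (s : List Char) (i : Int) : Char :=
  (PySem.List.pyGet? s i).getD ' '

-- the while loop of A, prepending to the string accumulator `ans`; fuel starts at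
-- (2*length).toNat and is exact (each iteration decreases row+col by at least 1 and
-- runs only while row > 0 and col > 0)
def pvLoopA (lps_dp : List (List Int)) (st rev : List Char) :
    Nat → Int → Int → List Char → List Char
  | 0, _, _, ans => ans
  | fuel+1, row, col, ans =>
    if row > 0 ∧ col > 0 then
      if pvCh st (row-1) = pvCh rev (col-1) then
        pvLoopA lps_dp st rev fuel (row-1) (col-1) (pvCh st (row-1) :: ans)
      else
        if pvDp lps_dp (row-1) col > pvDp lps_dp row (col-1) then
          pvLoopA lps_dp st rev fuel (row-1) col ans
        else
          pvLoopA lps_dp st rev fuel row (col-1) ans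
    else ans

def print_lps (lps_dp : List (List Int)) (length : Int) (st : String) (rev : String) : String :=
  String.mk (pvLoopA lps_dp st.toList rev.toList (2*length).toNat length length [])

-- ===== PORT B =====
-- B's walk: state (row, hi, runs); a match opens/extends the current run (hi = its
-- exclusive end in st), a mismatch closes it onto `runs`; fuel exact as in port A.
-- Returns the final (row, hi, runs).
def pvWalkB (lps_dp : List (List Int)) (st rev : List Char) :
    Nat → Int → Int → Option Int → List (Int × Int) → Int × Option Int × List (Int × Int)
  | 0, row, _, hi, runs => (row, hi, runs)
  | fuel+1, row, col, hi, runs =>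
    if row > 0 ∧ col > 0 then
      if pvCh st (row-1) = pvCh rev (col-1) then
        pvWalkB lps_dp st rev fuel (row-1) (col-1) (some (hi.getD row)) runs
      else
        let runs' := match hi with
          | some h => runs ++ [(row, h)]
          | none => runs
        if pvDp lps_dp (row-1) col > pvDp lps_dp row (col-1) then
          pvWalkB lps_dp st rev fuel (row-1) col none runs'
        else
          pvWalkB lps_dp st rev fuel row (col-1) none runs'
    else (row, hi, runs)

-- the `if hi is not None: runs.append((row, hi))` after the loop
def pvFinish (s : Int × Option Int × List (Int × Int)) : List (Int × Int) :=
  match s.2.1 with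
  | some h => s.2.2 ++ [(s.1, h)]
  | none => s.2.2

-- ''.join(st[lo:hi] for lo, hi in reversed(runs))
def pvRender (st : List Char) (runs : List (Int × Int)) : List Char :=
  (runs.reverse.map (fun p => PySem.List.slice st (some p.1) (some p.2))).flatten

def print_lps_alt (lps_dp : List (List Int)) (length : Int) (st : String) (rev : String) : String :=
  String.mk (pvRender st.toList
    (pvFinish (pvWalkB lps_dp st.toList rev.toList (2*length).toNat length length none [])))

-- ===== PRECONDITION & SPEC =====
-- Pre_ excludes inputs on which A's indexing raises IndexError (length beyond the strings,
-- or a dp table too small for the cells the traceback reads). It is slightly narrower than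
-- strict necessity: it admits the all-match diagonal path (equal length-prefixes, dp never
-- read) and the fully-sized table, but excludes rare partially-sized tables whose accessed
-- cells all happen to be in range although A returns (see cites).
def Pre_print_lps (lps_dp : List (List Int)) (length : Int) (st : String) (rev : String) : Prop :=
  length ≤ 0 ∨
    (length ≤ (st.length : Int) ∧ length ≤ (rev.length : Int) ∧
     (st.toList.take length.toNat = rev.toList.take length.toNat ∨
      (length < (lps_dp.length : Int) ∧ ∀ r ∈ lps_dp, length < (r.length : Int))))
instance (lps_dp : List (List Int)) (length : Int) (st : String) (rev : String) : Decidable (Pre_print_lps lps_dp length st rev) := by unfold Pre_print_lps; infer_instance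

def pvWitness_print_lps : List (List Int) × Int × String × String :=
  ([[0, 0], [0, 1]], 1, "a", "a")

def Spec_print_lps (lps_dp : List (List Int)) (length : Int) (st : String) (rev : String) (out : String) : Prop := out = print_lps_alt lps_dp length st rev
instance (lps_dp : List (List Int)) (length : Int) (st : String) (rev : String) (out : String) : Decidable (Spec_print_lps lps_dp length st rev out) := by unfold Spec_print_lps; infer_instance

-- ===== CLAIM (what is proved, stated in full; the proofs are below) =====
def Claim_equal_print_lps : Prop := ∀ (lps_dp : List (List Int)) (length : Int) (st : String) (rev : String), Dom_print_lps lps_dp length st rev → Pre_print_lps lps_dp length st rev → Spec_print_lps lps_dp length st rev (print_lps lps_dp length st rev)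

-- ===== LEMMAS AND PROOFS =====
-- B's walk only ever appends to `runs`, and row/hi of the final state ignore it.
theorem pvWalkB_runs (lps_dp : List (List Int)) (st rev : List Char) :
    ∀ (fuel : Nat) (row col : Int) (hi : Option Int) (runs : List (Int × Int)),
      pvWalkB lps_dp st rev fuel row col hi runs =
        ((pvWalkB lps_dp st rev fuel row col hi []).1,
         (pvWalkB lps_dp st rev fuel row col hi []).2.1,
         runs ++ (pvWalkB lps_dp st rev fuel row col hi []).2.2) := by
  intro fuel
  induction fuel with
  | zero => intro row col hi runs; simp [pvWalkB]
  | succ n ih =>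
    intro row col hi runs
    by_cases h : row > 0 ∧ col > 0
    · by_cases hc : pvCh st (row-1) = pvCh rev (col-1)
      · simp only [pvWalkB, if_pos h, if_pos hc]
        exact ih _ _ _ runs
      · by_cases hd : pvDp lps_dp (row-1) col > pvDp lps_dp row (col-1)
        · cases hi with
          | none =>
            simp only [pvWalkB, if_pos h, if_neg hc, if_pos hd]
            exact ih _ _ _ runs
          | some hv =>
            simp only [pvWalkB, if_pos h, if_neg hc, if_pos hd]
            rw [ih _ _ _ (runs ++ [(row, hv)]), ih _ _ _ ([] ++ [(row, hv)])]
            simp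
        · cases hi with
          | none =>
            simp only [pvWalkB, if_pos h, if_neg hc, if_neg hd]
            exact ih _ _ _ runs
          | some hv =>
            simp only [pvWalkB, if_pos h, if_neg hc, if_neg hd]
            rw [ih _ _ _ (runs ++ [(row, hv)]), ih _ _ _ ([] ++ [(row, hv)])]
            simp
    · simp [pvWalkB, if_neg h]

-- rendering peels the FIRST (innermost-discovered) run off the back of the string
theorem pvRender_cons (st : List Char) (a : Int × Int) (runs : List (Int × Int)) :
    pvRender st (a :: runs) = pvRender st runs ++ PySem.List.slice st (some a.1) (some a.2) := by
  simp [pvRender]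

-- the pending run (r..h) as characters
def pvPend (st : List Char) (r : Int) (hi : Option Int) : List Char :=
  match hi with
  | some h => PySem.List.slice st (some r) (some h)
  | none => []

-- one more matched character extends the pending slice at its low end
theorem pvSlice_cons (st : List Char) (r h : Int) (h0 : 0 < r) (hrh : r ≤ h)
    (hlen : r ≤ (st.length : Int)) :
    pvCh st (r-1) :: PySem.List.slice st (some r) (some h) =
      PySem.List.slice st (some (r-1)) (some h) := by
  have h0' : (0:Int) ≤ r - 1 := by omega
  have hh : (0:Int) ≤ h := by omega
  rw [PySem.List.slice_toNat st (by omega) hh, PySem.List.slice_toNat st h0' hh]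
  have hlt : (r-1).toNat < st.length := by omega
  have hr1 : r.toNat = (r-1).toNat + 1 := by omega
  have hch : pvCh st (r-1) = st[(r-1).toNat] := by
    rw [pvCh, PySem.List.pyGet?_of_nonneg st h0', List.getElem?_eq_getElem hlt]
    rfl
  rw [hch, hr1, List.drop_eq_getElem_cons hlt]
  have htk : h.toNat - (r-1).toNat = (h.toNat - ((r-1).toNat + 1)) + 1 := by omega
  rw [htk, List.take_succ_cons]

-- main invariant: A's prepend-loop from (row,col) with the pending run's characters
-- already in `ans` equals B's walk rendered through pvFinish.
theorem pvLoopA_eq_walkB (lps_dp : List (List Int)) (st rev : List Char) :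
    ∀ (fuel : Nat) (row col : Int) (hi : Option Int) (ans : List Char),
      row ≤ (st.length : Int) → (∀ h ∈ hi, row ≤ h) →
      pvLoopA lps_dp st rev fuel row col (pvPend st row hi ++ ans) =
        pvRender st (pvFinish (pvWalkB lps_dp st rev fuel row col hi [])) ++ ans := by
  intro fuel
  induction fuel with
  | zero =>
    intro row col hi ans _ _
    cases hi <;> simp [pvLoopA, pvWalkB, pvFinish, pvPend, pvRender]
  | succ n ih =>
    intro row col hi ans hlen hhi
    by_cases h : row > 0 ∧ col > 0
    · by_cases hc : pvCh st (row-1) = pvCh rev (col-1)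
      · -- match: extend the pending run
        simp only [pvLoopA, pvWalkB, if_pos h, if_pos hc]
        have hpend : pvCh st (row-1) :: pvPend st row hi =
            pvPend st (row-1) (some (hi.getD row)) := by
          cases hi with
          | none =>
            have hrr : PySem.List.slice st (some row) (some row) = [] := by
              rw [PySem.List.slice_toNat st (by omega) (by omega)]
              simp
            simp only [pvPend, Option.getD]
            rw [← pvSlice_cons st row row h.1 le_rfl hlen, hrr]
          | some hv =>
            simp only [pvPend, Option.getD]
            exact pvSlice_cons st row hv h.1 (hhi hv rfl) hlen
        rw [show pvCh st (row-1) :: (pvPend st row hi ++ ans)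
              = (pvCh st (row-1) :: pvPend st row hi) ++ ans from rfl, hpend]
        refine ih (row-1) (col-1) (some (hi.getD row)) ans (by omega) ?_
        intro x hx
        cases hi with
        | none => simp [Option.getD] at hx ⊢; omega
        | some hv =>
          have := hhi hv rfl
          simp [Option.getD] at hx ⊢
          omega
      · -- mismatch: close the pending run (if any), move by the dp comparison
        have hclose : ∀ (row' col' : Int), row' ≤ (st.length : Int) →
            pvLoopA lps_dp st rev n row' col' (pvPend st row hi ++ ans) =
              pvRender st (pvFinish
                (pvWalkB lps_dp st rev n row' col' none
                  (pvFinish (row, hi, [])))) ++ ans := by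
          intro row' col' hlen'
          cases hi with
          | none =>
            simpa [pvPend, pvFinish] using ih row' col' none ans hlen' (by simp)
          | some hv =>
            have hfin0 : pvFinish (row, some hv, ([] : List (Int × Int))) = [(row, hv)] := by
              simp [pvFinish]
            rw [hfin0, pvWalkB_runs lps_dp st rev n row' col' none [(row, hv)]]
            have := ih row' col' none (PySem.List.slice st (some row) (some hv) ++ ans)
              hlen' (by simp)
            simp only [pvPend, List.nil_append] at this
            simp only [pvPend]
            rw [this]
            have hfin : pvFinish ((pvWalkB lps_dp st rev n row' col' none []).1,
                (pvWalkB lps_dp st rev n row' col' none []).2.1,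
                (row, hv) :: (pvWalkB lps_dp st rev n row' col' none []).2.2) =
                (row, hv) :: pvFinish (pvWalkB lps_dp st rev n row' col' none []) := by
              unfold pvFinish
              cases (pvWalkB lps_dp st rev n row' col' none []).2.1 <;> simp
            rw [show ((row, hv) :: []) ++ (pvWalkB lps_dp st rev n row' col' none []).2.2
                  = (row, hv) :: (pvWalkB lps_dp st rev n row' col' none []).2.2 from rfl,
                hfin, pvRender_cons]
            simp
        by_cases hd : pvDp lps_dp (row-1) col > pvDp lps_dp row (col-1)
        · simp only [pvLoopA, pvWalkB, if_pos h, if_neg hc, if_pos hd]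
          cases hi with
          | none => simpa [pvFinish] using hclose (row-1) col (by omega)
          | some hv => simpa [pvFinish] using hclose (row-1) col (by omega)
        · simp only [pvLoopA, pvWalkB, if_pos h, if_neg hc, if_neg hd]
          cases hi with
          | none => simpa [pvFinish] using hclose row (col-1) hlen
          | some hv => simpa [pvFinish] using hclose row (col-1) hlen
    · cases hi <;>
        simp [pvLoopA, pvWalkB, if_neg h, pvFinish, pvPend, pvRender]

-- ===== VERDICT (by name: the statement is the Claim_ definition above) =====
theorem print_lps_spec : Claim_equal_print_lps := by
  intro lps_dp length st rev _ hpre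
  unfold Spec_print_lps print_lps print_lps_alt
  by_cases hpos : 0 < length
  · have hlen : length ≤ (st.toList.length : Int) := by
      rcases hpre with h0 | ⟨h1, _⟩
      · omega
      · simpa using h1
    have := pvLoopA_eq_walkB lps_dp st.toList rev.toList (2*length).toNat length length
      none [] hlen (by simp)
    simp only [pvPend, List.append_nil] at this
    rw [this]
  · have hfuel : (2*length).toNat = 0 := by omega
    rw [hfuel]
    simp [pvLoopA, pvWalkB, pvFinish, pvRender]
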